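-- pv_equiv track=rewrite | github.com/srrDB/pyrescene | resample/ebml.py | GetUIntLength
-- ===== SOURCE A (Python) =====
-- def GetUIntLength(length_descriptor):
-- 	"""Returns the amount of bytes that will be consumed,
-- 	based on the first read byte, the Length Descriptor."""
-- 	assert 0 <= length_descriptor <= 0xFF
-- 	length = 0
-- 	for i in range(8):  # big endian
-- 		if (length_descriptor & (0x80 >> i)) != 0:  # 128, 64, 32, ..., 1
-- 			length = i + 1
-- 			break
--
-- 	assert 0 <= length <= 8
-- 	return length
-- ===== SOURCE B (Python) =====
-- def GetUIntLength(length_descriptor):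
-- 	"""Returns the amount of bytes that will be consumed,
-- 	based on the first read byte, the Length Descriptor."""
-- 	assert 0 <= length_descriptor <= 0xFF
-- 	length = 0 if length_descriptor == 0 else 9 - length_descriptor.bit_length()
-- 	assert 0 <= length <= 8
-- 	return length
-- ===== Notes on version B (the rewrite author's own statement) =====
-- stated objective: idiomatic
-- what changed: replaced the 8-iteration mask scan (0x80>>i) with a closed form using int.bit_length: 0 for 0, otherwise 9 - bit_length
import Mathlib
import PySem

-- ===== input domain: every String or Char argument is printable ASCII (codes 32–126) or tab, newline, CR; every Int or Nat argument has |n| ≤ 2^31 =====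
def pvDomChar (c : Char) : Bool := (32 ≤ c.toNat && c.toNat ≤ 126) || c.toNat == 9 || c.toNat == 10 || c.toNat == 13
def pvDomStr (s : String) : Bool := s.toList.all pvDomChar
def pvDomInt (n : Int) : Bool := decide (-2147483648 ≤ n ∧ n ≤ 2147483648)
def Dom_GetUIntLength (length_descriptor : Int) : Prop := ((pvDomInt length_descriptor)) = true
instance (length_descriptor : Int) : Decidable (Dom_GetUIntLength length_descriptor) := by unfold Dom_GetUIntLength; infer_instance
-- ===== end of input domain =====

-- ===== PORT A =====
-- loop `for i in range(8): if ld & (0x80 >> i) != 0: length = i+1; break`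
def GetUIntLengthLoop (ld : Int) : List Nat → Int
  | [] => 0
  | i :: rest =>
      if ld.land ((0x80 : Int) >>> (i : Int)) ≠ 0 then (i : Int) + 1
      else GetUIntLengthLoop ld rest

def GetUIntLength (length_descriptor : Int) : Int :=
  GetUIntLengthLoop length_descriptor (List.range 8)

-- ===== PORT B =====
-- `0 if ld == 0 else 9 - ld.bit_length()`; Nat.size n = n.bit_length() for n ≥ 0
def GetUIntLength_alt (length_descriptor : Int) : Int :=
  if length_descriptor = 0 then 0 else 9 - (Nat.size length_descriptor.toNat : Int)

-- ===== PRECONDITION & SPEC =====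
-- A asserts 0 <= length_descriptor <= 0xFF: outside this range A raises AssertionError
def Pre_GetUIntLength (length_descriptor : Int) : Prop :=
  0 ≤ length_descriptor ∧ length_descriptor ≤ 255
instance (length_descriptor : Int) : Decidable (Pre_GetUIntLength length_descriptor) := by
  unfold Pre_GetUIntLength; infer_instance

def pvWitness_GetUIntLength : Int := (37)

def Spec_GetUIntLength (length_descriptor : Int) (out : Int) : Prop := out = GetUIntLength_alt length_descriptor
instance (length_descriptor : Int) (out : Int) : Decidable (Spec_GetUIntLength length_descriptor out) := by unfold Spec_GetUIntLength; infer_instance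

-- ===== CLAIM (what is proved, stated in full; the proofs are below) =====
def Claim_equal_GetUIntLength : Prop := ∀ (length_descriptor : Int), Dom_GetUIntLength length_descriptor → Pre_GetUIntLength length_descriptor → Spec_GetUIntLength length_descriptor (GetUIntLength length_descriptor)

-- ===== LEMMAS AND PROOFS =====
-- (proof is a finite case check over 0..255)

-- ===== VERDICT (by name: the statement is the Claim_ definition above) =====
theorem GetUIntLength_spec : Claim_equal_GetUIntLength := by
  intro ld _ hpre
  obtain ⟨h0, h255⟩ := hpre
  unfold Spec_GetUIntLength
  interval_cases ld <;> decide
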